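-- pv_equiv track=rewrite | github.com/Deckard017/CS412_FA23 | Assignment5/code/homework5.py | recursion_to_get_patterns
-- ===== SOURCE A (Python) =====
-- def recursion_to_get_patterns(prefix, PDB, min_sup):
--     Patterns={}     #This is the dictionary that will be returned
--     frequency_for_each_item={}             #This is the dictionary that will be used to count the frequency of each item
--     frequency_after_sorted={}      #This is the dictionary that will be used to store the items that have frequency greater than or equal to min_sup
--     patterns_after_delete_element_less_than_threshold={}           #This is the dictionary that will be used to store the items that have frequency greater than or equal to min_sup
--     counted={}
--     for i in PDB:
--         counted.clear()             #This is to clear the dictionary after each iteration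
--         for j in i:
--             if not counted.get(j,False):        #This is to check if the item has already been counted or not
--                 counted[j]=True
--                 frequency_for_each_item[j]=frequency_for_each_item.get(j,0)+1       #This is to count the frequency of each item
--     frequency_after_sorted={k: v for k, v in sorted(frequency_for_each_item.items(), key=lambda item: item[1], reverse=True)}
--     for key,value in frequency_after_sorted.items():    #This is to store the items that have frequency greater than or equal to min_sup
--         if(value>=min_sup):          #If frequency is greater than or equal to min_sup, then add it to the dictionary
--             patterns_after_delete_element_less_than_threshold[key]=value
--             Patterns[prefix+key]=value
--     for key in patterns_after_delete_element_less_than_threshold: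
--         temps=[]
--         for i in PDB:
--             if(i.find(key)!=-1):
--                 temp=i[i.find(key)+1:]
--                 temps.append(temp)
--         next_prefix=recursion_to_get_patterns(prefix+key, temps, min_sup)
--         Patterns.update(next_prefix)
--     return Patterns
-- ===== SOURCE B (Python) =====
-- def recursion_to_get_patterns(prefix, PDB, min_sup):
--     # One pass over the PDB: count each item's (per-sequence-distinct) support and,
--     # at the same time, bucket (sequence, first-occurrence index) per distinct item,
--     # so the per-item rescans of the PDB (the repeated i.find(key) passes) disappear;
--     # suffixes are materialised only for the frequent items.
--     freq = {}
--     buckets = {}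
--     for s in PDB:
--         seen = set()
--         for idx, ch in enumerate(s):
--             if ch not in seen:
--                 seen.add(ch)
--                 freq[ch] = freq.get(ch, 0) + 1
--                 buckets.setdefault(ch, []).append((s, idx))
--     frequent = [(ch, v) for ch, v in
--                 sorted(freq.items(), key=lambda kv: kv[1], reverse=True)
--                 if v >= min_sup]
--     patterns = {}
--     for ch, v in frequent:
--         patterns[prefix + ch] = v
--     for ch, _ in frequent:
--         temps = [s[idx + 1:] for s, idx in buckets[ch]]
--         patterns.update(recursion_to_get_patterns(prefix + ch, temps, min_sup))
--     return patterns
-- ===== Notes on version B (the rewrite author's own statement) =====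
-- stated objective: alternative
-- what changed: B makes one pass over the projected database, counting per-sequence-distinct supports and bucketing (sequence, first-occurrence index) per item simultaneously, so the per-frequent-item rescans of the whole PDB (A's repeated i.find(key) passes) disappear; suffixes are sliced only for frequent items.
import Mathlib
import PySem

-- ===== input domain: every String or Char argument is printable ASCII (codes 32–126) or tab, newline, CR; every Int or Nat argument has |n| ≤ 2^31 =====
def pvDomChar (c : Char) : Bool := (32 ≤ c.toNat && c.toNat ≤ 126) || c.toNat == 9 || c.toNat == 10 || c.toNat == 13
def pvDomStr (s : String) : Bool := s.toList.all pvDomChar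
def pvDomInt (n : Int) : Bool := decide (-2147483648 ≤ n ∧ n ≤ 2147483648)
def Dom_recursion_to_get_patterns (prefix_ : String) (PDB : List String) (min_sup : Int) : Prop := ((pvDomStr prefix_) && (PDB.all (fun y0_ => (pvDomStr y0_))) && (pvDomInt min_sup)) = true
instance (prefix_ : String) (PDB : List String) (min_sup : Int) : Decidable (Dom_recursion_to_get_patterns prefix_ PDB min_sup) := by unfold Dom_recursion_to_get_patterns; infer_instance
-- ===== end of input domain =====

-- B builds every projected bucket in one pass over the PDB instead of A's per-frequent-item
-- rescans with i.find(key); same return value, no speed claim (constants differ, not measured faster).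
-- Both recursions terminate because every projected sequence is a strict suffix; the ports carry a
-- fuel argument (total PDB length + 1, always sufficient) purely as a totality guard.

-- ===== PORT A =====
-- prefix + key (Python string concatenation with a 1-char string), shared by both ports
def pvCat (p : String) (c : Char) : String := String.ofList (p.toList ++ [c])

-- the inner 'for j in i' body: counted / frequency_for_each_item updates
def pvA_count1 (st : PySem.Dict Char Bool × PySem.Dict Char Int) (j : Char) :
    PySem.Dict Char Bool × PySem.Dict Char Int :=
  if !(st.1.getD j false) then
    (st.1.insert j true, st.2.insert j (st.2.getD j 0 + 1))
  else st

-- the counting loop; counted.clear() at the top of each iteration = a fresh empty dict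
def pvA_freq (PDB : List String) : PySem.Dict Char Int :=
  PDB.foldl (fun freq i => (i.toList.foldl pvA_count1 (PySem.Dict.empty, freq)).2) PySem.Dict.empty

-- temps: 'if i.find(key) != -1: temps.append(i[i.find(key)+1:])'
def pvA_temps (PDB : List String) (key : Char) : List String :=
  PDB.foldl (fun temps i =>
    if PySem.Str.find i (String.ofList [key]) ≠ -1 then
      temps ++ [PySem.Str.slice i (some (PySem.Str.find i (String.ofList [key]) + 1)) none]
    else temps) []

-- the recursive body; 'frequency_after_sorted' is a dict rebuilt from the sorted items list with
-- unique keys, so iterating its .items() is iterating that sorted list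
def pvA_rec : Nat → String → List String → Int → PySem.Dict String Int
  | 0, _, _, _ => PySem.Dict.empty   -- fuel guard only; never reached from the wrapper
  | (fuel+1), prefix_, PDB, min_sup =>
    let freq := pvA_freq PDB
    let sortedItems := PySem.List.sorted freq.items (fun p => p.2) true
    let pp := sortedItems.foldl (fun st kv =>
        if kv.2 ≥ min_sup then (st.1.insert kv.1 kv.2, st.2.insert (pvCat prefix_ kv.1) kv.2)
        else st)
      ((PySem.Dict.empty : PySem.Dict Char Int), (PySem.Dict.empty : PySem.Dict String Int))
    pp.1.keys.foldl (fun pats key =>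
        pats.update (pvA_rec fuel (pvCat prefix_ key) (pvA_temps PDB key) min_sup).items)
      pp.2

-- total length of the PDB + 1: an upper bound on the recursion depth (each projected database is
-- built from strict suffixes of sequences that contain the key, so the total length drops by ≥ 1)
def pvFuel (PDB : List String) : Nat := (PDB.map (fun s => s.toList.length)).sum + 1

def recursion_to_get_patterns (prefix_ : String) (PDB : List String) (min_sup : Int) : List (String × Int) :=
  (pvA_rec (pvFuel PDB) prefix_ PDB min_sup).items

-- ===== PORT B =====
-- body of 'for idx, ch in enumerate(s): if ch not in seen: ...';
-- buckets.setdefault(ch, []).append((s, idx)) = "get ch's list (default []) and append" = Dict.modify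
def pvB_scan1 (s : String)
    (st : PySem.Set Char × PySem.Dict Char Int × PySem.Dict Char (List (String × Int)))
    (p : Int × Char) :
    PySem.Set Char × PySem.Dict Char Int × PySem.Dict Char (List (String × Int)) :=
  if !(PySem.Set.contains st.1 p.2) then
    (PySem.Set.add st.1 p.2,
     st.2.1.insert p.2 (st.2.1.getD p.2 0 + 1),
     st.2.2.modify p.2 [] (· ++ [(s, p.1)]))
  else st

-- the single pass over the PDB building freq and buckets
def pvB_scan (PDB : List String) :
    PySem.Dict Char Int × PySem.Dict Char (List (String × Int)) :=
  PDB.foldl (fun fb s =>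
      ((PySem.List.enumerate s.toList 0).foldl (pvB_scan1 s) (PySem.Set.empty, fb.1, fb.2)).2)
    (PySem.Dict.empty, PySem.Dict.empty)

def pvB_rec : Nat → String → List String → Int → PySem.Dict String Int
  | 0, _, _, _ => PySem.Dict.empty   -- fuel guard only; never reached from the wrapper
  | (fuel+1), prefix_, PDB, min_sup =>
    let fb := pvB_scan PDB
    let frequent := (PySem.List.sorted fb.1.items (fun kv => kv.2) true).filter
        (fun kv => kv.2 ≥ min_sup)
    let patterns := frequent.foldl
        (fun pats kv => pats.insert (pvCat prefix_ kv.1) kv.2) PySem.Dict.empty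
    frequent.foldl (fun pats kv =>
        -- buckets[kv.1]: the key is present (kv is frequent, hence was bucketed); getD is exact here
        let temps := (fb.2.getD kv.1 []).map
            (fun si => PySem.Str.slice si.1 (some (si.2 + 1)) none)
        pats.update (pvB_rec fuel (pvCat prefix_ kv.1) temps min_sup).items)
      patterns

def recursion_to_get_patterns_alt (prefix_ : String) (PDB : List String) (min_sup : Int) : List (String × Int) :=
  (pvB_rec (pvFuel PDB) prefix_ PDB min_sup).items

-- ===== PRECONDITION & SPEC =====
def Spec_recursion_to_get_patterns (prefix_ : String) (PDB : List String) (min_sup : Int) (out : List (String × Int)) : Prop := out = recursion_to_get_patterns_alt prefix_ PDB min_sup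
instance (prefix_ : String) (PDB : List String) (min_sup : Int) (out : List (String × Int)) : Decidable (Spec_recursion_to_get_patterns prefix_ PDB min_sup out) := by unfold Spec_recursion_to_get_patterns; infer_instance

-- ===== CLAIM (what is proved, stated in full; the proofs are below) =====
def Claim_equal_recursion_to_get_patterns : Prop := ∀ (prefix_ : String) (PDB : List String) (min_sup : Int), Dom_recursion_to_get_patterns prefix_ PDB min_sup → Spec_recursion_to_get_patterns prefix_ PDB min_sup (recursion_to_get_patterns prefix_ PDB min_sup)

-- ===== LEMMAS AND PROOFS =====

-- (char, absolute index) of each first occurrence of a char not in 'seen', in order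
def fsuf (k : Int) (seen : List Char) : List Char → List (Char × Int)
  | [] => []
  | c :: t => if c ∈ seen then fsuf (k+1) seen t else (c, k) :: fsuf (k+1) (c :: seen) t

lemma fsuf_congr (l : List Char) : ∀ (k : Int) (s1 s2 : List Char),
    (∀ x, x ∈ s1 ↔ x ∈ s2) → fsuf k s1 l = fsuf k s2 l := by
  induction l with
  | nil => intros; rfl
  | cons c t ih =>
    intro k s1 s2 h
    simp only [fsuf, h c]
    by_cases hc : c ∈ s2
    · simp [hc, ih _ _ _ h]
    · simp only [hc, if_false]
      have : ∀ x, x ∈ c :: s1 ↔ x ∈ c :: s2 := by intro x; simp [h x]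
      rw [ih _ _ _ this]

lemma fsuf_not_mem (l : List Char) : ∀ (k : Int) (seen : List Char) (p : Char × Int),
    p ∈ fsuf k seen l → p.1 ∉ seen := by
  induction l with
  | nil => intro _ _ _ h; simp [fsuf] at h
  | cons c t ih =>
    intro k seen p hp
    simp only [fsuf] at hp
    by_cases hc : c ∈ seen
    · simp only [hc, if_true] at hp; exact ih _ _ _ hp
    · simp only [hc, if_false, List.mem_cons] at hp
      rcases hp with rfl | hp
      · exact hc
      · have := ih _ _ _ hp; intro hmem; exact this (List.mem_cons_of_mem _ hmem)

-- the per-string spec of the frequency fold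
def pvSpecFreqStep (fr : PySem.Dict Char Int) (s : String) : PySem.Dict Char Int :=
  (fsuf 0 [] s.toList).foldl (fun fr p => fr.insert p.1 (fr.getD p.1 0 + 1)) fr

def pvSpecFreq (PDB : List String) : PySem.Dict Char Int :=
  PDB.foldl pvSpecFreqStep PySem.Dict.empty

def pvSpecBkStep (bk : PySem.Dict Char (List (String × Int))) (s : String) :
    PySem.Dict Char (List (String × Int)) :=
  (fsuf 0 [] s.toList).foldl (fun bk p => bk.modify p.1 [] (· ++ [(s, p.2)])) bk

def pvSpecBk (PDB : List String) : PySem.Dict Char (List (String × Int)) :=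
  PDB.foldl pvSpecBkStep PySem.Dict.empty

lemma pvA_count_eq (l : List Char) : ∀ (k : Int) (seen : List Char)
    (counted : PySem.Dict Char Bool) (fr : PySem.Dict Char Int),
    (∀ c, counted.getD c false = decide (c ∈ seen)) →
    (l.foldl pvA_count1 (counted, fr)).2
      = (fsuf k seen l).foldl (fun fr p => fr.insert p.1 (fr.getD p.1 0 + 1)) fr := by
  induction l with
  | nil => intros; rfl
  | cons c t ih =>
    intro k seen counted fr h
    simp only [List.foldl_cons, fsuf, pvA_count1, h c]
    by_cases hc : c ∈ seen
    · simp only [hc, decide_true, Bool.not_true, Bool.false_eq_true, if_false, if_true]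
      exact ih _ _ _ _ h
    · simp only [hc, decide_false, Bool.not_false, if_true, if_false, List.foldl_cons]
      exact ih _ _ _ _ (by
        intro c'
        rw [PySem.Dict.getD_insert]
        by_cases hcc : c' = c <;> simp [hcc, h c'])

lemma pvA_freq_eq (PDB : List String) : pvA_freq PDB = pvSpecFreq PDB := by
  unfold pvA_freq pvSpecFreq
  congr 1
  funext freq i
  exact pvA_count_eq i.toList 0 [] _ _ (by intro c; simp [PySem.Dict.getD_empty])

lemma pvB_scan1_eq (s : String) (l : List Char) : ∀ (k : Int) (seen : PySem.Set Char)
    (fr : PySem.Dict Char Int) (bk : PySem.Dict Char (List (String × Int))),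
    ((PySem.List.enumerate l k).foldl (pvB_scan1 s) (seen, fr, bk)).2
      = ((fsuf k seen l).foldl (fun fr p => fr.insert p.1 (fr.getD p.1 0 + 1)) fr,
         (fsuf k seen l).foldl (fun bk p => bk.modify p.1 [] (· ++ [(s, p.2)])) bk) := by
  induction l with
  | nil => intros; rfl
  | cons c t ih =>
    intro k seen fr bk
    simp only [PySem.List.enumerate, List.foldl_cons, fsuf, pvB_scan1]
    by_cases hc : c ∈ seen
    · simp only [hc, if_true]
      have hcon : PySem.Set.contains seen c = true := by
        simp [PySem.Set.contains_eq_listContains, hc]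
      simp only [hcon, Bool.not_true, Bool.false_eq_true, if_false]
      exact ih _ _ _ _
    · simp only [hc, if_false]
      have hcon : PySem.Set.contains seen c = false := by
        simp [PySem.Set.contains_eq_listContains, hc]
      simp only [hcon, Bool.not_false, if_true, List.foldl_cons]
      rw [ih]
      rw [fsuf_congr t _ (PySem.Set.add seen c) (c :: seen) (by
        intro x; rw [PySem.Set.mem_add]; simp [or_comm])]

lemma pvB_scan_eq (PDB : List String) : pvB_scan PDB = (pvSpecFreq PDB, pvSpecBk PDB) := by
  unfold pvB_scan pvSpecFreq pvSpecBk
  have : ∀ (l : List String) (fr : PySem.Dict Char Int) (bk : PySem.Dict Char (List (String × Int))),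
      l.foldl (fun fb s =>
        ((PySem.List.enumerate s.toList 0).foldl (pvB_scan1 s) (PySem.Set.empty, fb.1, fb.2)).2) (fr, bk)
      = (l.foldl pvSpecFreqStep fr, l.foldl pvSpecBkStep bk) := by
    intro l
    induction l with
    | nil => intros; rfl
    | cons s t ih =>
      intro fr bk
      rw [List.foldl_cons, List.foldl_cons, List.foldl_cons, pvB_scan1_eq]
      exact ih _ _
  exact this PDB _ _

-- first occurrence via find, single-character needle
lemma single_prefix_iff (c : Char) (l : List Char) : [c] <+: l ↔ ∃ t, l = c :: t := by
  cases l with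
  | nil => simp
  | cons a t =>
    constructor
    · intro h
      rcases (List.cons_prefix_cons.1 h) with ⟨rfl, _⟩
      exact ⟨t, rfl⟩
    · intro ⟨t', h⟩
      cases h
      exact List.cons_prefix_cons.2 ⟨rfl, List.nil_prefix⟩

lemma find_cons_single (a : Char) (t : List Char) (c : Char) :
    PySem.Chars.find (a :: t) [c]
      = if a = c then 0
        else (if PySem.Chars.find t [c] = -1 then -1 else PySem.Chars.find t [c] + 1) := by
  by_cases hac : a = c
  · subst hac
    rw [if_pos rfl]
    have hinf : [a] <:+: (a :: t) := List.IsPrefix.isInfix ((single_prefix_iff a (a::t)).2 ⟨t, rfl⟩)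
    have h0 : 0 ≤ PySem.Chars.find (a :: t) [a] := (PySem.Chars.find_nonneg_iff _ _).2 hinf
    obtain ⟨hpre, hmin⟩ := PySem.Chars.find_spec h0
    by_contra hne
    have htn := Int.toNat_of_nonneg h0
    have hpos : 0 < (PySem.Chars.find (a :: t) [a]).toNat := by omega
    exact hmin 0 hpos (by simp only [List.drop_zero]; exact (single_prefix_iff a (a::t)).2 ⟨t, rfl⟩)
  · simp only [if_neg hac]
    by_cases ht : PySem.Chars.find t [c] = -1
    · simp only [if_pos ht]
      apply (PySem.Chars.find_eq_neg_one_iff _ _).2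
      intro hinf
      rcases List.infix_cons_iff.1 hinf with hpre | hinf'
      · rcases (single_prefix_iff _ _).1 hpre with ⟨t', ht'⟩
        exact hac (by cases ht'; rfl)
      · exact (PySem.Chars.find_eq_neg_one_iff _ _).1 ht hinf'
    · simp only [if_neg ht]
      have hj : 0 ≤ PySem.Chars.find t [c] := by
        have := PySem.Chars.neg_one_le_find (s := t) (sub := [c]); omega
      obtain ⟨hjpre, hjmin⟩ := PySem.Chars.find_spec hj
      have hinf : [c] <:+: (a :: t) := by
        apply List.infix_cons_iff.2
        right
        exact (PySem.Chars.find_ne_neg_one_iff _ _).1 ht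
      have hf : 0 ≤ PySem.Chars.find (a :: t) [c] := (PySem.Chars.find_nonneg_iff _ _).2 hinf
      obtain ⟨hfpre, hfmin⟩ := PySem.Chars.find_spec hf
      set f := PySem.Chars.find (a :: t) [c] with hfdef
      set j := PySem.Chars.find t [c] with hjdef
      have hf0 : f.toNat ≠ 0 := by
        intro h0
        rw [h0, List.drop_zero] at hfpre
        rcases (single_prefix_iff _ _).1 hfpre with ⟨t', ht'⟩
        exact hac (by cases ht'; rfl)
      obtain ⟨m, hm⟩ : ∃ m, f.toNat = m + 1 := ⟨f.toNat - 1, by omega⟩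
      have hmpre : [c] <+: t.drop m := by
        have := hfpre; rw [hm] at this; simpa using this
      have hmge : j.toNat ≤ m := by
        by_contra hlt
        exact hjmin m (by omega) hmpre
      have hmle : m ≤ j.toNat := by
        have : ¬ (j.toNat + 1 + 1 ≤ f.toNat) := by
          intro hle
          exact hfmin (j.toNat + 1) (by omega) (by simpa using hjpre)
        omega
      have htn := Int.toNat_of_nonneg hf
      have htj := Int.toNat_of_nonneg hj
      omega

lemma fsuf_filter_eq (l : List Char) : ∀ (k : Int) (seen : List Char) (c : Char), c ∉ seen →
    (fsuf k seen l).filter (fun p => p.1 == c)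
      = if PySem.Chars.find l [c] = -1 then []
        else [(c, k + PySem.Chars.find l [c])] := by
  induction l with
  | nil =>
    intro k seen c _
    have : PySem.Chars.find [] [c] = -1 := by
      apply (PySem.Chars.find_eq_neg_one_iff _ _).2
      simp
    simp [fsuf, this]
  | cons a t ih =>
    intro k seen c hc
    rw [find_cons_single]
    by_cases hac : a = c
    · subst hac
      rw [if_pos rfl]
      have has : a ∉ seen := hc
      simp only [fsuf, has, if_false]
      rw [List.filter_cons]
      simp only [beq_self_eq_true, if_pos]
      have hrest : (fsuf (k+1) (a :: seen) t).filter (fun p => p.1 == a) = [] := by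
        rw [List.filter_eq_nil_iff]
        intro p hp
        have := fsuf_not_mem t (k+1) (a :: seen) p hp
        simp only [List.mem_cons, not_or] at this
        simp [this.1]
      rw [hrest]
      simp
    · simp only [hac, if_false]
      by_cases has : a ∈ seen
      · simp only [fsuf, has, if_true]
        rw [ih (k+1) seen c hc]
        by_cases ht : PySem.Chars.find t [c] = -1
        · simp [ht]
        · have hge : PySem.Chars.find t [c] + 1 ≠ -1 := by
            have := PySem.Chars.neg_one_le_find (s := t) (sub := [c]); omega
          simp only [ht, if_false]
          rw [if_neg hge]
          congr 2
          ring
      · simp only [fsuf, has, if_false]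
        rw [List.filter_cons]
        have : ((a, k).1 == c) = false := by simp [hac]
        simp only [this, Bool.false_eq_true, if_false]
        rw [ih (k+1) (a :: seen) c (by
          intro h
          rcases List.mem_cons.1 h with h1 | h2
          · exact hac h1.symm
          · exact hc h2)]
        by_cases ht : PySem.Chars.find t [c] = -1
        · simp [ht]
        · have hge : PySem.Chars.find t [c] + 1 ≠ -1 := by
            have := PySem.Chars.neg_one_le_find (s := t) (sub := [c]); omega
          simp only [ht, if_false]
          rw [if_neg hge]
          congr 2
          ring

lemma pvSpecBkStep_getD (bk : PySem.Dict Char (List (String × Int))) (s : String) (c : Char) :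
    (pvSpecBkStep bk s).getD c []
      = bk.getD c [] ++ ((fsuf 0 [] s.toList).filter (fun p => p.1 == c)).map (fun p => (s, p.2)) := by
  unfold pvSpecBkStep
  rw [show ((fsuf 0 [] s.toList).foldl (fun bk p => bk.modify p.1 [] (· ++ [(s, p.2)])) bk)
      = (((fsuf 0 [] s.toList).map (fun p => (p.1, (s, p.2)))).foldl
          (fun d q => d.modify q.1 [] (· ++ [q.2])) bk) from (List.foldl_map
            (f := fun p : Char × Int => (p.1, (s, p.2)))
            (g := fun d (q : Char × (String × Int)) => d.modify q.1 [] (· ++ [q.2]))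
            (l := fsuf 0 [] s.toList) (init := bk)).symm]
  rw [PySem.Dict.getD_foldl_modify_append]
  rw [List.filter_map, List.map_map]
  rfl

lemma pvSpecBk_getD (PDB : List String) (c : Char) :
    (pvSpecBk PDB).getD c []
      = PDB.flatMap (fun s =>
          ((fsuf 0 [] s.toList).filter (fun p => p.1 == c)).map (fun p => (s, p.2))) := by
  unfold pvSpecBk
  have gen : ∀ (l : List String) (bk : PySem.Dict Char (List (String × Int))),
      (l.foldl pvSpecBkStep bk).getD c []
        = bk.getD c [] ++ l.flatMap (fun s =>
            ((fsuf 0 [] s.toList).filter (fun p => p.1 == c)).map (fun p => (s, p.2))) := by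
    intro l
    induction l with
    | nil => intro bk; simp
    | cons s t ih =>
      intro bk
      rw [List.foldl_cons, ih, pvSpecBkStep_getD]
      simp [List.flatMap_cons]
  rw [gen]
  simp [PySem.Dict.getD_empty]

lemma pvA_temps_eq (PDB : List String) (c : Char) :
    pvA_temps PDB c
      = ((pvSpecBk PDB).getD c []).map
          (fun si => PySem.Str.slice si.1 (some (si.2 + 1)) none) := by
  rw [pvSpecBk_getD, List.map_flatMap]
  unfold pvA_temps
  have gen : ∀ (l : List String) (acc : List String),
      l.foldl (fun temps i =>
        if PySem.Str.find i (String.ofList [c]) ≠ -1 then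
          temps ++ [PySem.Str.slice i (some (PySem.Str.find i (String.ofList [c]) + 1)) none]
        else temps) acc
      = acc ++ l.flatMap (fun i =>
          if PySem.Str.find i (String.ofList [c]) ≠ -1 then
            [PySem.Str.slice i (some (PySem.Str.find i (String.ofList [c]) + 1)) none]
          else []) := by
    intro l
    induction l with
    | nil => intro acc; simp
    | cons s t ih =>
      intro acc
      rw [List.foldl_cons, List.flatMap_cons]
      by_cases h : PySem.Str.find s (String.ofList [c]) ≠ -1
      · rw [if_pos h, if_pos h, ih]; simp
      · rw [if_neg h, if_neg h, ih]; simp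
  rw [gen]
  rw [List.nil_append]
  congr 1
  funext s
  rw [fsuf_filter_eq s.toList 0 [] c (by simp)]
  by_cases h : PySem.Chars.find s.toList [c] = -1
  · rw [if_pos h]
    rw [if_neg (by simp [h])]
    simp
  · rw [if_neg h]
    rw [if_pos (by simp [h])]
    simp

lemma pvSpecFreq_nodup_keys (PDB : List String) : (pvSpecFreq PDB).keys.Nodup := by
  unfold pvSpecFreq
  have : ∀ (l : List String) (d : PySem.Dict Char Int), d.keys.Nodup →
      (l.foldl pvSpecFreqStep d).keys.Nodup := by
    intro l
    induction l with
    | nil => intro d h; exact h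
    | cons s t ih =>
      intro d h
      simp only [List.foldl_cons]
      exact ih _ (PySem.Dict.nodup_keys_foldl_insert_key _ _ _ _ h)
  exact this PDB _ PySem.Dict.nodup_keys_empty

lemma pvAB_rec_eq (fuel : Nat) : ∀ (prefix_ : String) (PDB : List String) (min_sup : Int),
    pvA_rec fuel prefix_ PDB min_sup = pvB_rec fuel prefix_ PDB min_sup := by
  induction fuel with
  | zero => intro p PDB m; rfl
  | succ fuel ih =>
    intro p PDB m
    simp only [pvA_rec, pvB_rec, pvA_freq_eq, pvB_scan_eq]
    have hsplit : (fun (st : PySem.Dict Char Int × PySem.Dict String Int) (kv : Char × Int) =>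
          if kv.2 ≥ m then (st.1.insert kv.1 kv.2, st.2.insert (pvCat p kv.1) kv.2) else st)
        = (fun st kv =>
            ((fun (d : PySem.Dict Char Int) (kv : Char × Int) =>
                if kv.2 ≥ m then d.insert kv.1 kv.2 else d) st.1 kv,
             (fun (d : PySem.Dict String Int) (kv : Char × Int) =>
                if kv.2 ≥ m then d.insert (pvCat p kv.1) kv.2 else d) st.2 kv)) := by
      funext st kv
      by_cases h : kv.2 ≥ m <;> simp [h]
    rw [hsplit, PySem.List.foldl_prod_mk
        (f := fun (d : PySem.Dict Char Int) (kv : Char × Int) =>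
            if kv.2 ≥ m then d.insert kv.1 kv.2 else d)
        (g := fun (d : PySem.Dict String Int) (kv : Char × Int) =>
            if kv.2 ≥ m then d.insert (pvCat p kv.1) kv.2 else d)]
    rw [PySem.List.foldl_ite_eq_foldl_filter, PySem.List.foldl_ite_eq_foldl_filter]
    dsimp only
    have hnd : ((List.filter (fun x => decide (x.2 ≥ m))
        (PySem.List.sorted (pvSpecFreq PDB).items (fun q => q.2) true)).map
          (fun kv : Char × Int => kv.1)).Nodup := by
      have hperm := PySem.List.sorted_perm (pvSpecFreq PDB).items (fun q : Char × Int => q.2) true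
      have hk := pvSpecFreq_nodup_keys PDB
      simp only [PySem.Dict.keys] at hk
      have hsortnd : ((PySem.List.sorted (pvSpecFreq PDB).items (fun q : Char × Int => q.2) true).map
          (fun kv : Char × Int => kv.1)).Nodup :=
        ((hperm.map (fun kv : Char × Int => kv.1)).nodup_iff).2 hk
      exact ((List.filter_sublist (p := fun x : Char × Int => decide (x.2 ≥ m))).map (fun kv : Char × Int => kv.1)).nodup hsortnd
    rw [PySem.Dict.keys_foldl_insert_key
        (key := fun kv : Char × Int => kv.1) (f := fun _ (kv : Char × Int) => kv.2),
      PySem.Dict.keys_empty, PySem.Set.update_nil_left,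
      PySem.Set.ofList_eq_self_of_nodup _ hnd,
      List.foldl_map]
    congr 1
    funext pats kv
    rw [pvA_temps_eq, ih]

-- ===== VERDICT (by name: the statement is the Claim_ definition above) =====
theorem recursion_to_get_patterns_spec : Claim_equal_recursion_to_get_patterns := by
  intro prefix_ PDB min_sup _
  unfold Spec_recursion_to_get_patterns recursion_to_get_patterns recursion_to_get_patterns_alt
  rw [pvAB_rec_eq]
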